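-- pv_equiv track=rewrite | github.com/LoicFromentin/Python | Cours ISN/Majuscule to Minuscule.py | Majuscule_To_Minuscule
-- ===== SOURCE A (Python) =====
-- def Majuscule_To_Minuscule (mot):
--     majuscules=["A","B","C","D","E","F","G","H","I","J","K","L","M","N","O","P","Q","R","S","T","U","V","W","X","Y","Z"]
--     minuscules=["a","b","c","d","e","f","g","h","i","j","k","l","m","n","o","p","q","r","s","t","u","v","w","x","y","z"]
--     for element in range (len(mot)):
--         for i in range (26):
--             if mot[element] == majuscules[i]:
--                 mot[element] = minuscules[i]
--     return(mot)
-- ===== SOURCE B (Python) =====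
-- _UPPER = frozenset("ABCDEFGHIJKLMNOPQRSTUVWXYZ")
--
-- def Majuscule_To_Minuscule(mot):
--     # Same in-place mutation of mot as A; closed-form +32 offset instead of a 26-entry table scan.
--     for i in range(len(mot)):
--         c = mot[i]
--         if c in _UPPER:
--             mot[i] = chr(ord(c) + 32)
--     return mot
-- ===== Notes on version B (the rewrite author's own statement) =====
-- stated objective: idiomatic
-- what changed: Replaces the inner 26-iteration scan over parallel uppercase/lowercase tables by a single membership test against a frozenset of uppercase letters plus the arithmetic mapping chr(ord(c)+32).
import Mathlib
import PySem

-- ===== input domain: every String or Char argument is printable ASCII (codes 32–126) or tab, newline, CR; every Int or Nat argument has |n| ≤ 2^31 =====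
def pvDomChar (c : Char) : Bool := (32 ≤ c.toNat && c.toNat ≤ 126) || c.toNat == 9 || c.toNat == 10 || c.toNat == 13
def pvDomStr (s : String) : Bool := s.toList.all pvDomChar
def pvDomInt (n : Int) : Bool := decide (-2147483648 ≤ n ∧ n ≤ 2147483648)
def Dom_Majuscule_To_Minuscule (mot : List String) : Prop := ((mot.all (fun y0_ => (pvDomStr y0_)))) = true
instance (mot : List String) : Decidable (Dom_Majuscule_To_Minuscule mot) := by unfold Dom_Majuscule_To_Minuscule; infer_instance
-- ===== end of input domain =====

-- B lowercases via a frozenset membership test + chr(ord(c)+32) instead of A's 26-entry parallel-table scan.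
-- Both A and B mutate `mot` in place identically in Python; the equivalence proved is about the returned list.


-- ===== PORT A =====
def pvMajuscules : List String :=
  ["A","B","C","D","E","F","G","H","I","J","K","L","M","N","O","P","Q","R","S","T","U","V","W","X","Y","Z"]
def pvMinuscules : List String :=
  ["a","b","c","d","e","f","g","h","i","j","k","l","m","n","o","p","q","r","s","t","u","v","w","x","y","z"]
-- the inner `for i in range(26)` loop acting on mot[element]
def pvInnerA (s : String) : String :=
  (List.range 26).foldl
    (fun cur (i : Nat) =>
      if cur == PySem.List.pyGetD pvMajuscules (i : Int) "" then
        PySem.List.pyGetD pvMinuscules (i : Int) ""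
      else cur)
    s
def Majuscule_To_Minuscule (mot : List String) : List String :=
  mot.map pvInnerA

-- ===== PORT B =====
def pvUpperSet : PySem.Set String :=
  PySem.Set.ofList (("ABCDEFGHIJKLMNOPQRSTUVWXYZ".toList).map (fun c => String.ofList [c]))
-- chr(ord(c)+32); ord raises unless c is a single character, which the guard guarantees,
-- so the fallthrough branch returning c unchanged is unreachable under the guard
def pvLowerOf (s : String) : String :=
  match s.toList with
  | [c] => String.ofList [Char.ofNat (c.toNat + 32)]
  | _ => s
def Majuscule_To_Minuscule_alt (mot : List String) : List String :=
  mot.map (fun c => if PySem.Set.contains pvUpperSet c then pvLowerOf c else c)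

-- ===== PRECONDITION & SPEC =====
def Spec_Majuscule_To_Minuscule (mot : List String) (out : List String) : Prop := out = Majuscule_To_Minuscule_alt mot
instance (mot : List String) (out : List String) : Decidable (Spec_Majuscule_To_Minuscule mot out) := by unfold Spec_Majuscule_To_Minuscule; infer_instance

-- ===== CLAIM (what is proved, stated in full; the proofs are below) =====
def Claim_equal_Majuscule_To_Minuscule : Prop := ∀ (mot : List String), Dom_Majuscule_To_Minuscule mot → Spec_Majuscule_To_Minuscule mot (Majuscule_To_Minuscule mot)

-- ===== LEMMAS AND PROOFS =====

-- the inner scan leaves s unchanged when s matches none of the scanned table entries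
theorem pvInnerA_foldl_id (s : String) (l : List Nat)
    (h : ∀ i ∈ l, s ≠ PySem.List.pyGetD pvMajuscules (i : Int) "") :
    l.foldl
      (fun cur (i : Nat) =>
        if cur == PySem.List.pyGetD pvMajuscules (i : Int) "" then
          PySem.List.pyGetD pvMinuscules (i : Int) ""
        else cur) s = s := by
  induction l with
  | nil => rfl
  | cons a t ih =>
    rw [List.foldl_cons, if_neg (by simpa using h a (List.mem_cons_self ..))]
    exact ih (fun i hi => h i (List.mem_cons_of_mem _ hi))

theorem pvUpperSet_eq : pvUpperSet = pvMajuscules := by decide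

theorem pvScanned_mem : ∀ i ∈ List.range 26, PySem.List.pyGetD pvMajuscules (i : Int) "" ∈ pvMajuscules := by
  decide

set_option maxRecDepth 4096 in
theorem pvPointwise (s : String) :
    pvInnerA s = (if PySem.Set.contains pvUpperSet s then pvLowerOf s else s) := by
  by_cases hs : s ∈ pvMajuscules
  · simp only [pvMajuscules, List.mem_cons, List.not_mem_nil, or_false] at hs
    rcases hs with rfl|rfl|rfl|rfl|rfl|rfl|rfl|rfl|rfl|rfl|rfl|rfl|rfl|rfl|rfl|rfl|rfl|rfl|rfl|rfl|rfl|rfl|rfl|rfl|rfl|rfl <;> decide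
  · have hc : PySem.Set.contains pvUpperSet s = false := by
      rw [pvUpperSet_eq]
      simp only [PySem.Set.contains_eq_listContains, List.contains_eq_mem, decide_eq_false_iff_not]
      exact hs
    rw [hc]
    simp only [if_false, Bool.false_eq_true]
    exact pvInnerA_foldl_id s _ (fun i hi h => hs (h ▸ pvScanned_mem i hi))

-- ===== VERDICT (by name: the statement is the Claim_ definition above) =====
theorem Majuscule_To_Minuscule_spec : Claim_equal_Majuscule_To_Minuscule := by
  intro mot _
  show Majuscule_To_Minuscule mot = Majuscule_To_Minuscule_alt mot
  unfold Majuscule_To_Minuscule Majuscule_To_Minuscule_alt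
  exact List.map_congr_left (fun s _ => pvPointwise s)
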